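-- pv_equiv track=rewrite | github.com/cocofee/auto-quota | web/backend/app/api/openclaw.py | _pick_primary_error_type
-- ===== SOURCE A (Python) =====
-- def _map_issue_type_to_openclaw_error(issue_type: str) -> str:
--     mapping = {
--         "category_mismatch": "wrong_family",
--         "anchor_conflict": "wrong_family",
--         "unit_conflict": "wrong_param",
--         "param_conflict": "wrong_param",
--         "book_conflict": "wrong_book",
--         "ambiguity_review": "low_confidence_override",
--         "price_mismatch": "low_confidence_override",
--         "missing_candidate": "missing_candidate",
--         "synonym_gap": "synonym_gap",
--     }
--     return mapping.get(issue_type, "unknown")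
--
-- def _pick_primary_error_type(issue_types: list[str]) -> str:
--     priority = [
--         "category_mismatch",
--         "anchor_conflict",
--         "book_conflict",
--         "unit_conflict",
--         "param_conflict",
--         "missing_candidate",
--         "synonym_gap",
--         "ambiguity_review",
--         "price_mismatch",
--     ]
--     issue_set = {str(item or "").strip() for item in issue_types if str(item or "").strip()}
--     for item in priority:
--         if item in issue_set:
--             return _map_issue_type_to_openclaw_error(item)
--     return _map_issue_type_to_openclaw_error(issue_types[0]) if issue_types else "unknown"
-- ===== SOURCE B (Python) =====
-- def _map_issue_type_to_openclaw_error(issue_type: str) -> str: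
--     mapping = {
--         "category_mismatch": "wrong_family",
--         "anchor_conflict": "wrong_family",
--         "unit_conflict": "wrong_param",
--         "param_conflict": "wrong_param",
--         "book_conflict": "wrong_book",
--         "ambiguity_review": "low_confidence_override",
--         "price_mismatch": "low_confidence_override",
--         "missing_candidate": "missing_candidate",
--         "synonym_gap": "synonym_gap",
--     }
--     return mapping.get(issue_type, "unknown")
--
--
-- def _pick_primary_error_type(issue_types: list[str]) -> str:
--     priority = [
--         "category_mismatch",
--         "anchor_conflict",
--         "book_conflict",
--         "unit_conflict",
--         "param_conflict",
--         "missing_candidate",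
--         "synonym_gap",
--         "ambiguity_review",
--         "price_mismatch",
--     ]
--     rank = {p: i for i, p in enumerate(priority)}
--     best = None  # (rank, canonical type) of the highest-priority type seen
--     for item in issue_types:
--         text = str(item or "").strip()
--         if not text:
--             continue
--         r = rank.get(text)
--         if r is not None and (best is None or r < best[0]):
--             best = (r, text)
--     if best is not None:
--         return _map_issue_type_to_openclaw_error(best[1])
--     return _map_issue_type_to_openclaw_error(issue_types[0]) if issue_types else "unknown"
-- ===== Notes on version B (the rewrite author's own statement) =====
-- stated objective: alternative
-- what changed: Replaces A's build-a-set-then-scan-the-fixed-priority-list strategy by a rank dictionary built once from the priority list and a single pass over the input items tracking the minimum rank seen, so the priority list is never scanned against the input.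
import Mathlib
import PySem

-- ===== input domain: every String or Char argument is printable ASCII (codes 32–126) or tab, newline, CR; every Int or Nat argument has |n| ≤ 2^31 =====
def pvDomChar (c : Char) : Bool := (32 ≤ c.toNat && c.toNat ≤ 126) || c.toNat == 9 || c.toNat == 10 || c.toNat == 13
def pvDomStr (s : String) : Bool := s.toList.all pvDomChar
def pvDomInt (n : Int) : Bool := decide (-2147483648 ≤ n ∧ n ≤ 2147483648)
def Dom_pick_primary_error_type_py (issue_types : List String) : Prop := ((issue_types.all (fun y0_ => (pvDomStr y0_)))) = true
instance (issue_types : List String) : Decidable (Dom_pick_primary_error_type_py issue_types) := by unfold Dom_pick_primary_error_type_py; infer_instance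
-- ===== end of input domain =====

-- B replaces the set-build-then-priority-scan by one pass over the input with a rank dictionary,
-- tracking the minimum-rank priority type seen (alternative decomposition, same return value).

-- ===== PORT A =====
-- shared same-module helper _map_issue_type_to_openclaw_error (mapping.get(issue_type, "unknown"))
def pvMapIssue (issue_type : String) : String :=
  PySem.Dict.getD (PySem.Dict.ofList [
    ("category_mismatch", "wrong_family"),
    ("anchor_conflict", "wrong_family"),
    ("unit_conflict", "wrong_param"),
    ("param_conflict", "wrong_param"),
    ("book_conflict", "wrong_book"),
    ("ambiguity_review", "low_confidence_override"),
    ("price_mismatch", "low_confidence_override"),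
    ("missing_candidate", "missing_candidate"),
    ("synonym_gap", "synonym_gap")]) issue_type "unknown"

def pvPriority : List String :=
  ["category_mismatch", "anchor_conflict", "book_conflict", "unit_conflict", "param_conflict",
   "missing_candidate", "synonym_gap", "ambiguity_review", "price_mismatch"]

-- str(item or "").strip() on a str argument: ("" or "") = "", "".strip() = "", so it is item.strip() (exact)
def pvClean (item : String) : String := PySem.Str.strip item

-- 'for item in priority: if item in issue_set: return _map…(item)'
def pvLoopA : List String → PySem.Set String → Option String
  | [], _ => none
  | p :: rest, s => if PySem.Set.contains s p then some (pvMapIssue p) else pvLoopA rest s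

def pick_primary_error_type_py (issue_types : List String) : String :=
  let issue_set : PySem.Set String :=
    PySem.Set.ofList ((issue_types.map pvClean).filter (fun t => t ≠ ""))
  match pvLoopA pvPriority issue_set with
  | some r => r
  | none =>
    match issue_types with
    | [] => "unknown"
    | first :: _ => pvMapIssue first

-- ===== PORT B =====
-- rank = {p: i for i, p in enumerate(priority)}
def pvRank : PySem.Dict String Int :=
  PySem.Dict.ofList (pvPriority.zipIdx.map (fun pi => (pi.1, (pi.2 : Int))))

-- one iteration of B's loop: keep the (rank, type) with the smallest rank seen so far
def pvStepB (best : Option (Int × String)) (item : String) : Option (Int × String) :=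
  let text := pvClean item
  if text = "" then best
  else
    match PySem.Dict.get? pvRank text with
    | none => best
    | some r =>
      match best with
      | none => some (r, text)
      | some b => if r < b.1 then some (r, text) else some b

def pick_primary_error_type_py_alt (issue_types : List String) : String :=
  match issue_types.foldl pvStepB none with
  | some b => pvMapIssue b.2
  | none =>
    match issue_types with
    | [] => "unknown"
    | first :: _ => pvMapIssue first

-- ===== PRECONDITION & SPEC =====
def Spec_pick_primary_error_type_py (issue_types : List String) (out : String) : Prop := out = pick_primary_error_type_py_alt issue_types
instance (issue_types : List String) (out : String) : Decidable (Spec_pick_primary_error_type_py issue_types out) := by unfold Spec_pick_primary_error_type_py; infer_instance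

-- ===== CLAIM (what is proved, stated in full; the proofs are below) =====
def Claim_equal_pick_primary_error_type_py : Prop := ∀ (issue_types : List String), Dom_pick_primary_error_type_py issue_types → Spec_pick_primary_error_type_py issue_types (pick_primary_error_type_py issue_types)

-- ===== LEMMAS AND PROOFS =====

-- the i-th priority type (total form)
def pvP (i : Nat) : String := pvPriority.getD i ""

-- 'p occurs among the cleaned input items'
def pvPresent (L : List String) (p : String) : Prop := p ∈ L.map pvClean

theorem pvP_ne_empty : ∀ i, i < 9 → pvP i ≠ "" := by
  intro i h; interval_cases i <;> decide

theorem pvP_inj : ∀ i j, i < 9 → j < 9 → pvP i = pvP j → i = j := by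
  intro i j hi hj; interval_cases i <;> interval_cases j <;> decide

theorem pvRank_get_P : ∀ i, i < 9 → PySem.Dict.get? pvRank (pvP i) = some (i : Int) := by
  intro i h; interval_cases i <;> decide

theorem pvRank_inv : ∀ t r, PySem.Dict.get? pvRank t = some r →
    ∃ i : Nat, i < 9 ∧ r = (i : Int) ∧ t = pvP i := by
  intro t r h
  rw [show pvRank = PySem.Dict.mk [("category_mismatch", (0:Int)), ("anchor_conflict", 1),
      ("book_conflict", 2), ("unit_conflict", 3), ("param_conflict", 4), ("missing_candidate", 5),
      ("synonym_gap", 6), ("ambiguity_review", 7), ("price_mismatch", 8)] from rfl] at h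
  simp only [PySem.Dict.get?_mk_cons] at h
  split_ifs at h with h0 h1 h2 h3 h4 h5 h6 h7 h8
  · injection h with h'; exact ⟨0, by omega, h'.symm, (eq_of_beq h0).symm⟩
  · injection h with h'; exact ⟨1, by omega, h'.symm, (eq_of_beq h1).symm⟩
  · injection h with h'; exact ⟨2, by omega, h'.symm, (eq_of_beq h2).symm⟩
  · injection h with h'; exact ⟨3, by omega, h'.symm, (eq_of_beq h3).symm⟩
  · injection h with h'; exact ⟨4, by omega, h'.symm, (eq_of_beq h4).symm⟩
  · injection h with h'; exact ⟨5, by omega, h'.symm, (eq_of_beq h5).symm⟩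
  · injection h with h'; exact ⟨6, by omega, h'.symm, (eq_of_beq h6).symm⟩
  · injection h with h'; exact ⟨7, by omega, h'.symm, (eq_of_beq h7).symm⟩
  · injection h with h'; exact ⟨8, by omega, h'.symm, (eq_of_beq h8).symm⟩
  · rw [show (PySem.Dict.mk ([] : List (String × Int))).get? t = none from rfl] at h; cases h

theorem pvPresent_append {L : List String} {c p : String} :
    pvPresent (L ++ [c]) p ↔ pvPresent L p ∨ p = pvClean c := by
  simp [pvPresent]

theorem pvStepB_eval (c : String) (k : Nat) (hk : k < 9) (hc : pvClean c = pvP k)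
    (best : Option (Int × String)) :
    pvStepB best c = match best with
      | none => some ((k : Int), pvP k)
      | some b => if (k : Int) < b.1 then some ((k : Int), pvP k) else some b := by
  cases best with
  | none => simp [pvStepB, hc, pvP_ne_empty k hk, pvRank_get_P k hk]
  | some b => simp [pvStepB, hc, pvP_ne_empty k hk, pvRank_get_P k hk]

-- characterization of B's fold: none and no priority type present, or the minimum-rank present type
theorem pvChar (L : List String) :
    (L.foldl pvStepB none = none ∧ ∀ i, i < 9 → ¬ pvPresent L (pvP i)) ∨
    (∃ i : Nat, i < 9 ∧ L.foldl pvStepB none = some ((i : Int), pvP i) ∧ pvPresent L (pvP i) ∧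
      ∀ j, j < i → ¬ pvPresent L (pvP j)) := by
  induction L using List.reverseRecOn with
  | nil => left; simp [pvPresent]
  | append_singleton L c ih =>
    rw [List.foldl_append]
    simp only [List.foldl_cons, List.foldl_nil]
    by_cases htext : pvClean c = ""
    · -- cleaned item empty: state and presence of priority types unchanged
      have hstep : ∀ b, pvStepB b c = b := by intro b; simp [pvStepB, htext]
      rcases ih with ⟨hM, hn⟩ | ⟨i, hi, hM, hp, hmin⟩
      · left
        refine ⟨by rw [hstep, hM], fun i h1 => ?_⟩
        rw [pvPresent_append]
        rintro (h | h)
        · exact hn i h1 h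
        · exact pvP_ne_empty i h1 (h.trans htext)
      · right
        refine ⟨i, hi, by rw [hstep, hM], pvPresent_append.mpr (Or.inl hp), fun j hj => ?_⟩
        rw [pvPresent_append]
        rintro (h | h)
        · exact hmin j hj h
        · exact pvP_ne_empty j (by omega) (h.trans htext)
    · cases hget : PySem.Dict.get? pvRank (pvClean c) with
      | none =>
        -- cleaned item is not a priority type
        have hstep : ∀ b, pvStepB b c = b := by intro b; simp [pvStepB, htext, hget]
        have hne : ∀ i, i < 9 → pvP i ≠ pvClean c := by
          intro i h1 h2
          rw [← h2, pvRank_get_P i h1] at hget; cases hget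
        rcases ih with ⟨hM, hn⟩ | ⟨i, hi, hM, hp, hmin⟩
        · left
          refine ⟨by rw [hstep, hM], fun i h1 => ?_⟩
          rw [pvPresent_append]
          rintro (h | h)
          · exact hn i h1 h
          · exact hne i h1 h
        · right
          refine ⟨i, hi, by rw [hstep, hM], pvPresent_append.mpr (Or.inl hp), fun j hj => ?_⟩
          rw [pvPresent_append]
          rintro (h | h)
          · exact hmin j hj h
          · exact hne j (by omega) h
      | some r =>
        obtain ⟨k, hk, rfl, hc⟩ := pvRank_inv _ _ hget
        have hpk : pvPresent (L ++ [c]) (pvP k) :=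
          pvPresent_append.mpr (Or.inr hc.symm)
        rcases ih with ⟨hM, hn⟩ | ⟨i, hi, hM, hp, hmin⟩
        · right
          refine ⟨k, hk, ?_, hpk, fun j hj => ?_⟩
          · rw [hM, pvStepB_eval c k hk hc]
          · rw [pvPresent_append]
            rintro (h | h)
            · exact hn j (by omega) h
            · exact absurd (pvP_inj j k (by omega) hk (h.trans hc)) (by omega)
        · by_cases hki : k < i
          · right
            refine ⟨k, hk, ?_, hpk, fun j hj => ?_⟩
            · rw [hM, pvStepB_eval c k hk hc]; exact if_pos (by show (k:Int) < (i:Int); exact_mod_cast hki)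
            · rw [pvPresent_append]
              rintro (h | h)
              · exact hmin j (by omega) h
              · exact absurd (pvP_inj j k (by omega) hk (h.trans hc)) (by omega)
          · right
            refine ⟨i, hi, ?_, pvPresent_append.mpr (Or.inl hp), fun j hj => ?_⟩
            · rw [hM, pvStepB_eval c k hk hc]; exact if_neg (by show ¬((k:Int) < (i:Int)); exact_mod_cast hki)
            · rw [pvPresent_append]
              rintro (h | h)
              · exact hmin j hj h
              · exact absurd (pvP_inj j k (by omega) hk (h.trans hc)) (by omega)

theorem pvPresent_iff {L : List String} {p : String} :
    pvPresent L p ↔ ∃ a ∈ L, pvClean a = p := by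
  simp [pvPresent, List.mem_map]

-- ===== VERDICT (by name: the statement is the Claim_ definition above) =====
theorem pick_primary_error_type_py_spec : Claim_equal_pick_primary_error_type_py := by
  intro L _
  show pick_primary_error_type_py L = pick_primary_error_type_py_alt L
  rcases pvChar L with ⟨hM, hn⟩ | ⟨i, hi, hM, hp, hmin⟩
  · have h0 : ¬∃ a ∈ L, pvClean a = "category_mismatch" := fun h => hn 0 (by omega) (pvPresent_iff.mpr h)
    have h1 : ¬∃ a ∈ L, pvClean a = "anchor_conflict" := fun h => hn 1 (by omega) (pvPresent_iff.mpr h)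
    have h2 : ¬∃ a ∈ L, pvClean a = "book_conflict" := fun h => hn 2 (by omega) (pvPresent_iff.mpr h)
    have h3 : ¬∃ a ∈ L, pvClean a = "unit_conflict" := fun h => hn 3 (by omega) (pvPresent_iff.mpr h)
    have h4 : ¬∃ a ∈ L, pvClean a = "param_conflict" := fun h => hn 4 (by omega) (pvPresent_iff.mpr h)
    have h5 : ¬∃ a ∈ L, pvClean a = "missing_candidate" := fun h => hn 5 (by omega) (pvPresent_iff.mpr h)
    have h6 : ¬∃ a ∈ L, pvClean a = "synonym_gap" := fun h => hn 6 (by omega) (pvPresent_iff.mpr h)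
    have h7 : ¬∃ a ∈ L, pvClean a = "ambiguity_review" := fun h => hn 7 (by omega) (pvPresent_iff.mpr h)
    have h8 : ¬∃ a ∈ L, pvClean a = "price_mismatch" := fun h => hn 8 (by omega) (pvPresent_iff.mpr h)
    simp [pick_primary_error_type_py, pick_primary_error_type_py_alt, pvLoopA, pvPriority, hM, h0, h1, h2, h3, h4, h5, h6, h7, h8]
  · interval_cases i
    · have ht : ∃ a ∈ L, pvClean a = "category_mismatch" := pvPresent_iff.mp hp
      simp [pick_primary_error_type_py, pick_primary_error_type_py_alt, pvLoopA, pvPriority, pvP, hM, ht]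
    · have ht : ∃ a ∈ L, pvClean a = "anchor_conflict" := pvPresent_iff.mp hp
      have f0 : ¬∃ a ∈ L, pvClean a = "category_mismatch" := fun h => hmin 0 (by omega) (pvPresent_iff.mpr h)
      simp [pick_primary_error_type_py, pick_primary_error_type_py_alt, pvLoopA, pvPriority, pvP, hM, ht, f0]
    · have ht : ∃ a ∈ L, pvClean a = "book_conflict" := pvPresent_iff.mp hp
      have f0 : ¬∃ a ∈ L, pvClean a = "category_mismatch" := fun h => hmin 0 (by omega) (pvPresent_iff.mpr h)
      have f1 : ¬∃ a ∈ L, pvClean a = "anchor_conflict" := fun h => hmin 1 (by omega) (pvPresent_iff.mpr h)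
      simp [pick_primary_error_type_py, pick_primary_error_type_py_alt, pvLoopA, pvPriority, pvP, hM, ht, f0, f1]
    · have ht : ∃ a ∈ L, pvClean a = "unit_conflict" := pvPresent_iff.mp hp
      have f0 : ¬∃ a ∈ L, pvClean a = "category_mismatch" := fun h => hmin 0 (by omega) (pvPresent_iff.mpr h)
      have f1 : ¬∃ a ∈ L, pvClean a = "anchor_conflict" := fun h => hmin 1 (by omega) (pvPresent_iff.mpr h)
      have f2 : ¬∃ a ∈ L, pvClean a = "book_conflict" := fun h => hmin 2 (by omega) (pvPresent_iff.mpr h)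
      simp [pick_primary_error_type_py, pick_primary_error_type_py_alt, pvLoopA, pvPriority, pvP, hM, ht, f0, f1, f2]
    · have ht : ∃ a ∈ L, pvClean a = "param_conflict" := pvPresent_iff.mp hp
      have f0 : ¬∃ a ∈ L, pvClean a = "category_mismatch" := fun h => hmin 0 (by omega) (pvPresent_iff.mpr h)
      have f1 : ¬∃ a ∈ L, pvClean a = "anchor_conflict" := fun h => hmin 1 (by omega) (pvPresent_iff.mpr h)
      have f2 : ¬∃ a ∈ L, pvClean a = "book_conflict" := fun h => hmin 2 (by omega) (pvPresent_iff.mpr h)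
      have f3 : ¬∃ a ∈ L, pvClean a = "unit_conflict" := fun h => hmin 3 (by omega) (pvPresent_iff.mpr h)
      simp [pick_primary_error_type_py, pick_primary_error_type_py_alt, pvLoopA, pvPriority, pvP, hM, ht, f0, f1, f2, f3]
    · have ht : ∃ a ∈ L, pvClean a = "missing_candidate" := pvPresent_iff.mp hp
      have f0 : ¬∃ a ∈ L, pvClean a = "category_mismatch" := fun h => hmin 0 (by omega) (pvPresent_iff.mpr h)
      have f1 : ¬∃ a ∈ L, pvClean a = "anchor_conflict" := fun h => hmin 1 (by omega) (pvPresent_iff.mpr h)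
      have f2 : ¬∃ a ∈ L, pvClean a = "book_conflict" := fun h => hmin 2 (by omega) (pvPresent_iff.mpr h)
      have f3 : ¬∃ a ∈ L, pvClean a = "unit_conflict" := fun h => hmin 3 (by omega) (pvPresent_iff.mpr h)
      have f4 : ¬∃ a ∈ L, pvClean a = "param_conflict" := fun h => hmin 4 (by omega) (pvPresent_iff.mpr h)
      simp [pick_primary_error_type_py, pick_primary_error_type_py_alt, pvLoopA, pvPriority, pvP, hM, ht, f0, f1, f2, f3, f4]
    · have ht : ∃ a ∈ L, pvClean a = "synonym_gap" := pvPresent_iff.mp hp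
      have f0 : ¬∃ a ∈ L, pvClean a = "category_mismatch" := fun h => hmin 0 (by omega) (pvPresent_iff.mpr h)
      have f1 : ¬∃ a ∈ L, pvClean a = "anchor_conflict" := fun h => hmin 1 (by omega) (pvPresent_iff.mpr h)
      have f2 : ¬∃ a ∈ L, pvClean a = "book_conflict" := fun h => hmin 2 (by omega) (pvPresent_iff.mpr h)
      have f3 : ¬∃ a ∈ L, pvClean a = "unit_conflict" := fun h => hmin 3 (by omega) (pvPresent_iff.mpr h)
      have f4 : ¬∃ a ∈ L, pvClean a = "param_conflict" := fun h => hmin 4 (by omega) (pvPresent_iff.mpr h)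
      have f5 : ¬∃ a ∈ L, pvClean a = "missing_candidate" := fun h => hmin 5 (by omega) (pvPresent_iff.mpr h)
      simp [pick_primary_error_type_py, pick_primary_error_type_py_alt, pvLoopA, pvPriority, pvP, hM, ht, f0, f1, f2, f3, f4, f5]
    · have ht : ∃ a ∈ L, pvClean a = "ambiguity_review" := pvPresent_iff.mp hp
      have f0 : ¬∃ a ∈ L, pvClean a = "category_mismatch" := fun h => hmin 0 (by omega) (pvPresent_iff.mpr h)
      have f1 : ¬∃ a ∈ L, pvClean a = "anchor_conflict" := fun h => hmin 1 (by omega) (pvPresent_iff.mpr h)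
      have f2 : ¬∃ a ∈ L, pvClean a = "book_conflict" := fun h => hmin 2 (by omega) (pvPresent_iff.mpr h)
      have f3 : ¬∃ a ∈ L, pvClean a = "unit_conflict" := fun h => hmin 3 (by omega) (pvPresent_iff.mpr h)
      have f4 : ¬∃ a ∈ L, pvClean a = "param_conflict" := fun h => hmin 4 (by omega) (pvPresent_iff.mpr h)
      have f5 : ¬∃ a ∈ L, pvClean a = "missing_candidate" := fun h => hmin 5 (by omega) (pvPresent_iff.mpr h)
      have f6 : ¬∃ a ∈ L, pvClean a = "synonym_gap" := fun h => hmin 6 (by omega) (pvPresent_iff.mpr h)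
      simp [pick_primary_error_type_py, pick_primary_error_type_py_alt, pvLoopA, pvPriority, pvP, hM, ht, f0, f1, f2, f3, f4, f5, f6]
    · have ht : ∃ a ∈ L, pvClean a = "price_mismatch" := pvPresent_iff.mp hp
      have f0 : ¬∃ a ∈ L, pvClean a = "category_mismatch" := fun h => hmin 0 (by omega) (pvPresent_iff.mpr h)
      have f1 : ¬∃ a ∈ L, pvClean a = "anchor_conflict" := fun h => hmin 1 (by omega) (pvPresent_iff.mpr h)
      have f2 : ¬∃ a ∈ L, pvClean a = "book_conflict" := fun h => hmin 2 (by omega) (pvPresent_iff.mpr h)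
      have f3 : ¬∃ a ∈ L, pvClean a = "unit_conflict" := fun h => hmin 3 (by omega) (pvPresent_iff.mpr h)
      have f4 : ¬∃ a ∈ L, pvClean a = "param_conflict" := fun h => hmin 4 (by omega) (pvPresent_iff.mpr h)
      have f5 : ¬∃ a ∈ L, pvClean a = "missing_candidate" := fun h => hmin 5 (by omega) (pvPresent_iff.mpr h)
      have f6 : ¬∃ a ∈ L, pvClean a = "synonym_gap" := fun h => hmin 6 (by omega) (pvPresent_iff.mpr h)
      have f7 : ¬∃ a ∈ L, pvClean a = "ambiguity_review" := fun h => hmin 7 (by omega) (pvPresent_iff.mpr h)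
      simp [pick_primary_error_type_py, pick_primary_error_type_py_alt, pvLoopA, pvPriority, pvP, hM, ht, f0, f1, f2, f3, f4, f5, f6, f7]
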